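-- pv_equiv track=rewrite | github.com/JakinChan200/TeamName | 2048.py | create_random_tile_local
-- ===== SOURCE A (Python) =====
-- import copy
--
-- def create_random_tile_local(board):
--     '''
--     adds 2 and then 4 in each open spot, one by one
--     possibility #1: return list of boards
--         con: the function that calls it has to deal with the list
--     possibility #2: yield instead of return
--
--     Currently outputs list of boards
--     '''
--     all_boards = list()
--     openSpots = list()
--     for i in range(4):
--         for j in range(4):
--             if board[i][j] == "":
--                 openSpots.append([i, j])
--     if len(openSpots) != 0:
--         for spot in openSpots:  #spot is a list of x,y coordinates
--             board[spot[0]][spot[1]] = "2" #This empty spot has a 2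
--             all_boards.append(copy.deepcopy(board)) #Track this position
--             board[spot[0]][spot[1]] = "4" #Set the 2 to a 4 spot
--             all_boards.append(copy.deepcopy(board)) #Track this position
--             board[spot[0]][spot[1]] = "" #Undo the 2 to a blank spot and loop to the other open spots
--     return all_boards
-- ===== SOURCE B (Python) =====
-- def create_random_tile_local(board):
--     '''Recursive descent over the flat cell index k = 0..15 (divmod into i, j),
--     building the result back-to-front; each board is built persistently from
--     slices (no mutation, no deepcopy, no openSpots list).'''
--     def go(k):
--         if k == 16:
--             return []
--         rest = go(k + 1)
--         i, j = divmod(k, 4)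
--         if board[i][j] != "":
--             return rest
--         row = board[i]
--         def with_v(v):
--             return board[:i] + [row[:j] + [v] + row[j + 1:]] + board[i + 1:]
--         return [with_v("2"), with_v("4")] + rest
--     return go(0)
-- ===== Notes on version B (the rewrite author's own statement) =====
-- stated objective: alternative
-- what changed: Replaces A's two-phase mutate/deepcopy/undo iteration (collect an openSpots list, then repeatedly write 2/4 into the shared board and snapshot it) with a recursion over the flat cell index 0..15 (divmod into row/column) that builds the result list back-to-front and constructs each output board persistently from slices, never mutating the input.
import Mathlib
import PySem

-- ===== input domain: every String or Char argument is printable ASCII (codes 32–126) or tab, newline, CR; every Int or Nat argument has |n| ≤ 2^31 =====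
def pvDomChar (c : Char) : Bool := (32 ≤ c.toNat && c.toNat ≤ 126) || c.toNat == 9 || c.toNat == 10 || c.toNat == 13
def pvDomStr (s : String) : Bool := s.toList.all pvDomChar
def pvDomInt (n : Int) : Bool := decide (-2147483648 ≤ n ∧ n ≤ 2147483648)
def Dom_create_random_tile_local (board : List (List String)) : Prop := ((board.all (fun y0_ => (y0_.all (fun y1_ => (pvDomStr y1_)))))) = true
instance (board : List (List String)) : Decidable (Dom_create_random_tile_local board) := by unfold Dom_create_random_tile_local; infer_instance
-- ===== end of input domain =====

-- B replaces A's collect-openSpots-then-mutate/deepcopy/undo iteration by a recursion over the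
-- flat cell index 0..15 that builds each result board persistently from slices (objective:
-- alternative decomposition). A temporarily mutates its argument but restores it before
-- returning; B never mutates it — the theorems below are about the return value.

-- shared cell primitive: board[i][j] read (both Pythons read cells this way)
def pvGetCell (b : List (List String)) (i j : Int) : String :=
  PySem.List.pyGetD (PySem.List.pyGetD b i []) j "?"

-- ===== PORT A =====
-- A's in-place cell write: copy of the board with board[i][j] = v
def pvSetCell (b : List (List String)) (i j : Int) (v : String) : List (List String) :=
  PySem.List.pySetD b i (PySem.List.pySetD (PySem.List.pyGetD b i []) j v)

-- loop body of A's 'for spot in openSpots' (state = (all_boards, board)): set "2", snapshot,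
-- set "4", snapshot, undo to ""
def pvStepA (st : List (List (List String)) × List (List String)) (spot : Int × Int) :
    List (List (List String)) × List (List String) :=
  let b2 := pvSetCell st.2 spot.1 spot.2 "2"
  let all2 := st.1 ++ [b2]
  let b4 := pvSetCell b2 spot.1 spot.2 "4"
  let all4 := all2 ++ [b4]
  let b0 := pvSetCell b4 spot.1 spot.2 ""
  (all4, b0)

def create_random_tile_local (board : List (List String)) : List (List (List String)) :=
  let openSpots : List (Int × Int) :=
    (PySem.List.pyRange 0 4 1).foldl (fun acc i =>
      (PySem.List.pyRange 0 4 1).foldl (fun acc2 j =>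
        if pvGetCell board i j = "" then acc2 ++ [(i, j)] else acc2) acc) []
  if PySem.List.len openSpots ≠ 0 then
    (openSpots.foldl pvStepA (([] : List (List (List String))), board)).1
  else []

-- ===== PORT B =====
-- B's with_v: board[:i] + [row[:j] + [v] + row[j+1:]] + board[i+1:]  (persistent, slice-built)
def pvPlaceB (board : List (List String)) (i j : Int) (v : String) : List (List String) :=
  PySem.List.slice board none (some i)
    ++ [PySem.List.slice (PySem.List.pyGetD board i []) none (some j) ++ [v]
          ++ PySem.List.slice (PySem.List.pyGetD board i []) (some (j + 1)) none]
    ++ PySem.List.slice board (some (i + 1)) none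

-- B's inner 'go(k)'. Python tests 'k == 16'; only k ≤ 16 is reachable, where '16 ≤ k' is the
-- same test (written this way so the recursion is well-founded for every k).
def pvGoB (board : List (List String)) (k : Nat) : List (List (List String)) :=
  if 16 ≤ k then []
  else
    let rest := pvGoB board (k + 1)
    let i : Int := (k : Int) / 4      -- divmod(k, 4): Lean Int '/' '%' agree with Python on k ≥ 0
    let j : Int := (k : Int) % 4
    if pvGetCell board i j ≠ "" then rest
    else pvPlaceB board i j "2" :: pvPlaceB board i j "4" :: rest
termination_by 16 - k

def create_random_tile_local_alt (board : List (List String)) : List (List (List String)) :=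
  pvGoB board 0

-- ===== PRECONDITION & SPEC =====
-- Pre_ excludes exactly the boards with fewer than 4 rows or with one of the first 4 rows shorter
-- than 4 cells: there A raises IndexError at board[i][j] (and B raises it too).
def Pre_create_random_tile_local (board : List (List String)) : Prop :=
  4 ≤ board.length ∧ ∀ r ∈ board.take 4, 4 ≤ r.length
instance (board : List (List String)) : Decidable (Pre_create_random_tile_local board) := by
  unfold Pre_create_random_tile_local; infer_instance

def pvWitness_create_random_tile_local : List (List String) :=
  [["2", "", "4", "8"], ["", "", "", ""], ["2", "2", "", "4"], ["8", "", "2", ""]]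

def Spec_create_random_tile_local (board : List (List String)) (out : List (List (List String))) : Prop := out = create_random_tile_local_alt board
instance (board : List (List String)) (out : List (List (List String))) : Decidable (Spec_create_random_tile_local board out) := by unfold Spec_create_random_tile_local; infer_instance

-- ===== CLAIM (what is proved, stated in full; the proofs are below) =====
def Claim_equal_create_random_tile_local : Prop := ∀ (board : List (List String)), Dom_create_random_tile_local board → Pre_create_random_tile_local board → Spec_create_random_tile_local board (create_random_tile_local board)

-- ===== LEMMAS AND PROOFS =====

-- the 16 (i, j) pairs A's nested loops traverse, in row-major order
def pvPairs : List (Int × Int) :=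
  (PySem.List.pyRange 0 4 1).flatMap fun i => (PySem.List.pyRange 0 4 1).map fun j => (i, j)

-- the pairs B's recursion still has to visit from flat index k on
def pvPairsFrom (k : Nat) : List (Int × Int) :=
  ((List.range 16).drop k).map fun m => (((m / 4 : Nat) : Int), ((m % 4 : Nat) : Int))

-- the two snapshot boards both versions emit for an open cell
def pvEmit (board : List (List String)) (p : Int × Int) : List (List (List String)) :=
  [pvSetCell board p.1 p.2 "2", pvSetCell board p.1 p.2 "4"]

lemma pv_mem_pairs (p : Int × Int) (hp : p ∈ pvPairs) :
    0 ≤ p.1 ∧ p.1 < 4 ∧ 0 ≤ p.2 ∧ p.2 < 4 := by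
  unfold pvPairs at hp
  simp only [List.mem_flatMap, List.mem_map] at hp
  obtain ⟨i, hi, j, hj, rfl⟩ := hp
  rw [PySem.List.mem_pyRange_one] at hi hj
  exact ⟨hi.1, hi.2, hj.1, hj.2⟩

-- a nested foldl over two lists is a foldl over the list of pairs
lemma pv_foldl_nested {α β γ : Type} (l1 : List α) (l2 : List β) (step : γ → α × β → γ) :
    ∀ init : γ,
      l1.foldl (fun a i => l2.foldl (fun a' j => step a' (i, j)) a) init
        = (l1.flatMap fun i => l2.map fun j => (i, j)).foldl step init := by
  induction l1 with
  | nil => intro init; simp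
  | cons x xs ih => intro init; simp [List.foldl_append, List.foldl_map, ih]

-- collecting loop: accumulating the matching elements is filtering
lemma pv_foldl_collect {α : Type} (P : α → Prop) [DecidablePred P] :
    ∀ (l : List α) (acc : List α),
      l.foldl (fun a x => if P x then a ++ [x] else a) acc
        = acc ++ l.filter (fun x => decide (P x)) := by
  intro l
  induction l with
  | nil => intro acc; simp
  | cons x xs ih =>
      intro acc
      by_cases h : P x <;> simp [List.foldl_cons, h, ih]

-- cell-level facts --------------------------------------------------------

-- proof-side Nat form of "copy with cell (m, n) set to v"
def pvSetN (b : List (List String)) (m n : Nat) (v : String) : List (List String) :=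
  b.set m ((b.getD m []).set n v)

lemma pv_setCell_eq (b : List (List String)) (i j : Int) (v : String)
    (hi : 0 ≤ i) (hj : 0 ≤ j) (hm : i.toNat < b.length) :
    pvSetCell b i j v = pvSetN b i.toNat j.toNat v := by
  unfold pvSetCell pvSetN
  rw [PySem.List.pySetD_of_nonneg _ _ hj, PySem.List.pySetD_of_nonneg _ _ hi,
      PySem.List.pyGetD_eq_getElem _ _ hi (by omega), List.getD_eq_getElem _ _ hm]

lemma pv_getCell_eq (b : List (List String)) (i j : Int)
    (hi : 0 ≤ i) (hj : 0 ≤ j) (hm : i.toNat < b.length)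
    (hn : j.toNat < (b.getD i.toNat []).length) :
    pvGetCell b i j = (b.getD i.toNat []).getD j.toNat "?" := by
  unfold pvGetCell
  have h1 : PySem.List.pyGetD b i ([] : List String) = b.getD i.toNat [] := by
    rw [PySem.List.pyGetD_eq_getElem _ _ hi (by omega), List.getD_eq_getElem _ _ hm]
  rw [h1, PySem.List.pyGetD_eq_getElem _ _ hj (by omega), List.getD_eq_getElem _ _ hn]

lemma pv_setN_setN (b : List (List String)) (m n : Nat) (v w : String)
    (hm : m < b.length) :
    pvSetN (pvSetN b m n v) m n w = pvSetN b m n w := by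
  have h1 : (b.set m ((b.getD m []).set n v)).getD m [] = (b.getD m []).set n v := by
    rw [List.getD_eq_getElem _ _ (by simpa using hm)]
    exact List.getElem_set_self _
  unfold pvSetN
  rw [h1, List.set_set, List.set_set]

lemma pv_setN_restore (b : List (List String)) (m n : Nat)
    (hm : m < b.length) (hn : n < (b.getD m []).length)
    (h : (b.getD m []).getD n "?" = "") :
    pvSetN b m n "" = b := by
  have h2 : (b.getD m []).set n ((b.getD m []).getD n "?") = b.getD m [] := by
    rw [List.getD_eq_getElem _ _ hn]
    exact List.set_getElem_self hn
  unfold pvSetN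
  rw [← h, h2, List.getD_eq_getElem _ _ hm, List.set_getElem_self hm]

lemma pv_row_len (board : List (List String))
    (hr : ∀ r ∈ board.take 4, 4 ≤ r.length) {m : Nat} (hm4 : m < 4) (hm : m < board.length) :
    4 ≤ (board.getD m []).length := by
  apply hr
  rw [List.getD_eq_getElem _ _ hm]
  have hlt : m < (board.take 4).length := by simp [List.length_take]; omega
  have he : (board.take 4)[m]'hlt = board[m] := List.getElem_take
  rw [← he]
  exact List.getElem_mem hlt

-- B's slice-built board equals the set-based board (natural-number coordinates in range)
lemma pv_placeB_eq (board : List (List String)) (a b : Nat) (v : String)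
    (hm : a < board.length) (hn : b < (board.getD a []).length) :
    pvPlaceB board (a : Int) (b : Int) v = pvSetN board a b v := by
  unfold pvPlaceB pvSetN
  have hrow : PySem.List.pyGetD board (a : Int) ([] : List String) = board.getD a [] := by
    rw [PySem.List.pyGetD_eq_getElem _ _ (by positivity) (by simpa using hm)]
    simp [List.getD_eq_getElem?_getD, List.getElem?_eq_getElem hm]
  have hb1 : ((b : Int) + 1) = ((b + 1 : Nat) : Int) := by push_cast; ring
  have ha1 : ((a : Int) + 1) = ((a + 1 : Nat) : Int) := by push_cast; ring
  rw [hrow, hb1, ha1, PySem.List.slice_to_natCast, PySem.List.slice_to_natCast,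
      PySem.List.slice_from_natCast, PySem.List.slice_from_natCast,
      List.set_eq_take_append_cons_drop, if_pos hm,
      List.set_eq_take_append_cons_drop, if_pos hn]
  simp

-- combined: on an in-range cell B's placement is A's snapshot board
lemma pv_placeB_eq_setCell (board : List (List String))
    (hb : 4 ≤ board.length) (hr : ∀ r ∈ board.take 4, 4 ≤ r.length)
    (a b : Nat) (ha : a < 4) (hb4 : b < 4) (v : String) :
    pvPlaceB board (a : Int) (b : Int) v = pvSetCell board (a : Int) (b : Int) v := by
  have hm : a < board.length := by omega
  have hn : b < (board.getD a []).length := by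
    have := pv_row_len board hr ha hm; omega
  rw [pv_placeB_eq board a b v hm hn,
      pv_setCell_eq board (a : Int) (b : Int) v (by positivity) (by positivity)
        (by simpa using hm)]
  simp

-- A's main loop: the board state is restored after every spot, so each snapshot is a
-- modification of the ORIGINAL board and the list grows by two boards per spot
lemma pv_loopA_inv (board : List (List String))
    (hb : 4 ≤ board.length) (hr : ∀ r ∈ board.take 4, 4 ≤ r.length) :
    ∀ (spots : List (Int × Int)) (acc : List (List (List String))),
      (∀ p ∈ spots, (0 ≤ p.1 ∧ p.1 < 4 ∧ 0 ≤ p.2 ∧ p.2 < 4) ∧ pvGetCell board p.1 p.2 = "") →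
      spots.foldl pvStepA (acc, board)
        = (acc ++ spots.flatMap (pvEmit board), board) := by
  intro spots
  induction spots with
  | nil => intro acc _; simp
  | cons p rest ih =>
      intro acc hall
      obtain ⟨⟨hi, hi4, hj, hj4⟩, hopen⟩ := hall p (List.mem_cons_self)
      have hm : p.1.toNat < board.length := by omega
      have hn : p.2.toNat < (board.getD p.1.toNat []).length := by
        have := pv_row_len board hr (show p.1.toNat < 4 by omega) hm
        omega
      have hm2 : p.1.toNat < (pvSetN board p.1.toNat p.2.toNat "2").length := by
        unfold pvSetN; simpa using hm
      have hm4' : p.1.toNat < (pvSetN board p.1.toNat p.2.toNat "4").length := by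
        unfold pvSetN; simpa using hm
      have hcell : (board.getD p.1.toNat []).getD p.2.toNat "?" = "" := by
        rw [← pv_getCell_eq board p.1 p.2 hi hj hm hn]; exact hopen
      have e2 : pvSetCell board p.1 p.2 "2" = pvSetN board p.1.toNat p.2.toNat "2" :=
        pv_setCell_eq board p.1 p.2 "2" hi hj hm
      have e4R : pvSetCell board p.1 p.2 "4" = pvSetN board p.1.toNat p.2.toNat "4" :=
        pv_setCell_eq board p.1 p.2 "4" hi hj hm
      have e4 : pvSetCell (pvSetCell board p.1 p.2 "2") p.1 p.2 "4"
          = pvSetN board p.1.toNat p.2.toNat "4" := by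
        rw [e2, pv_setCell_eq _ p.1 p.2 "4" hi hj hm2,
            pv_setN_setN board _ _ "2" "4" hm]
      have e0 : pvSetCell (pvSetN board p.1.toNat p.2.toNat "4") p.1 p.2 "" = board := by
        rw [pv_setCell_eq _ p.1 p.2 "" hi hj hm4',
            pv_setN_setN board _ _ "4" "" hm,
            pv_setN_restore board _ _ hm hn hcell]
      have hstep : pvStepA (acc, board) p
          = (acc ++ [pvSetCell board p.1 p.2 "2", pvSetCell board p.1 p.2 "4"], board) := by
        simp only [pvStepA]
        rw [e4, e0, e2, e4R]
        simp
      rw [List.foldl_cons, hstep,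
          ih _ (fun q hq => hall q (List.mem_cons_of_mem _ hq))]
      simp [pvEmit]

-- B's recursion from index k produces the emissions of the remaining open pairs
lemma pv_goB_eq (board : List (List String))
    (hb : 4 ≤ board.length) (hr : ∀ r ∈ board.take 4, 4 ≤ r.length) :
    ∀ (n k : Nat), 16 ≤ k + n →
      pvGoB board k
        = ((pvPairsFrom k).filter
            (fun p => decide (pvGetCell board p.1 p.2 = ""))).flatMap (pvEmit board) := by
  intro n
  induction n with
  | zero =>
      intro k hk
      have hk16 : 16 ≤ k := by omega
      unfold pvGoB pvPairsFrom
      rw [if_pos hk16, List.drop_eq_nil_of_le (by simpa using hk16)]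
      simp
  | succ n ih =>
      intro k hk
      by_cases hk16 : 16 ≤ k
      · unfold pvGoB pvPairsFrom
        rw [if_pos hk16, List.drop_eq_nil_of_le (by simpa using hk16)]
        simp
      · have hklt : k < 16 := by omega
        have hdrop : (List.range 16).drop k = k :: (List.range 16).drop (k + 1) := by
          rw [List.drop_eq_getElem_cons (by simpa using hklt)]
          simp
        have hpf : pvPairsFrom k
            = (((k / 4 : Nat) : Int), ((k % 4 : Nat) : Int)) :: pvPairsFrom (k + 1) := by
          unfold pvPairsFrom
          rw [hdrop, List.map_cons]
        have hdiv : ((k : Int) / 4) = ((k / 4 : Nat) : Int) :=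
          Eq.symm (Nat.ToInt.div_congr rfl rfl)
        have hmod : ((k : Int) % 4) = ((k % 4 : Nat) : Int) :=
          Eq.symm (Nat.ToInt.mod_congr rfl rfl)
        unfold pvGoB
        rw [if_neg hk16]
        simp only [hdiv, hmod]
        rw [ih (k + 1) (by omega), hpf]
        by_cases hcell : pvGetCell board ((k / 4 : Nat) : Int) ((k % 4 : Nat) : Int) = ""
        · rw [if_neg (by simpa using hcell)]
          rw [List.filter_cons_of_pos (by simpa using hcell), List.flatMap_cons]
          rw [pv_placeB_eq_setCell board hb hr (k / 4) (k % 4) (by omega) (by omega) "2",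
              pv_placeB_eq_setCell board hb hr (k / 4) (k % 4) (by omega) (by omega) "4"]
          simp [pvEmit]
        · rw [if_pos (by simpa using hcell),
              List.filter_cons_of_neg (by simpa using hcell)]

-- A's row-major pair list coincides with B's flat-index pair list
lemma pv_pairs_from_zero : pvPairsFrom 0 = pvPairs := by decide

-- the central equality
lemma pv_main (board : List (List String)) (hpre : Pre_create_random_tile_local board) :
    create_random_tile_local board = create_random_tile_local_alt board := by
  obtain ⟨hb, hr⟩ := hpre
  set P : Int × Int → Prop := fun p => pvGetCell board p.1 p.2 = "" with hP
  -- B equals the flatMap over the filtered pairs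
  have hB : create_random_tile_local_alt board
      = (pvPairs.filter (fun p => decide (P p))).flatMap (pvEmit board) := by
    unfold create_random_tile_local_alt
    rw [pv_goB_eq board hb hr 16 0 (by omega), pv_pairs_from_zero]
  -- A's openSpots list is the same filtered pair list
  have hspots : (PySem.List.pyRange 0 4 1).foldl (fun acc i =>
      (PySem.List.pyRange 0 4 1).foldl (fun acc2 j =>
        if pvGetCell board i j = "" then acc2 ++ [(i, j)] else acc2) acc) ([] : List (Int × Int))
      = pvPairs.filter (fun p => decide (P p)) := by
    have h1 : (PySem.List.pyRange 0 4 1).foldl (fun acc i =>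
        (PySem.List.pyRange 0 4 1).foldl (fun acc2 j =>
          if pvGetCell board i j = "" then acc2 ++ [(i, j)] else acc2) acc) ([] : List (Int × Int))
        = pvPairs.foldl (fun a p => if P p then a ++ [p] else a) [] :=
      pv_foldl_nested (PySem.List.pyRange 0 4 1) (PySem.List.pyRange 0 4 1)
        (fun a p => if P p then a ++ [p] else a) []
    rw [h1, pv_foldl_collect]
    simp
  unfold create_random_tile_local
  rw [hspots, hB]
  by_cases hempty : pvPairs.filter (fun p => decide (P p)) = []
  · simp [hempty, PySem.List.len_eq]
  · have hne : PySem.List.len (pvPairs.filter (fun p => decide (P p))) ≠ 0 := by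
      simp only [PySem.List.len_eq, ne_eq, Int.natCast_eq_zero, List.length_eq_zero_iff]
      exact hempty
    rw [if_pos hne]
    rw [pv_loopA_inv board hb hr _ []
      (by
        intro q hq
        have hmem := List.mem_filter.mp hq
        refine ⟨pv_mem_pairs q hmem.1, ?_⟩
        simpa [hP] using hmem.2)]
    simp

-- ===== VERDICT (by name: the statement is the Claim_ definition above) =====
theorem create_random_tile_local_spec : Claim_equal_create_random_tile_local := by
  intro board _ hpre
  unfold Spec_create_random_tile_local
  exact pv_main board hpre
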